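-- pv_equiv track=rewrite | github.com/zinshin36/umamusume-helper | planner.py | skill_overlap_penalty
-- ===== SOURCE A (Python) =====
-- def skill_overlap_penalty(deck):
--     seen = set()
--     penalty = 0
--
--     for card in deck:
--         for skill in card.get("skills", []):
--             if skill in seen:
--                 penalty += 20
--             seen.add(skill)
--
--     return penalty
-- ===== SOURCE B (Python) =====
-- def skill_overlap_penalty(deck):
--     all_skills = sorted(s for card in deck for s in card.get("skills", []))
--     return 20 * sum(1 for a, b in zip(all_skills, all_skills[1:]) if a == b)
-- ===== Notes on version B (the rewrite author's own statement) =====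
-- stated objective: alternative
-- what changed: Replaces the incremental seen-set membership loop with a sort-then-scan: flatten all skills, sort them, and count equal adjacent pairs in the sorted list (each repeat contributes exactly one adjacent equality).
import Mathlib
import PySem

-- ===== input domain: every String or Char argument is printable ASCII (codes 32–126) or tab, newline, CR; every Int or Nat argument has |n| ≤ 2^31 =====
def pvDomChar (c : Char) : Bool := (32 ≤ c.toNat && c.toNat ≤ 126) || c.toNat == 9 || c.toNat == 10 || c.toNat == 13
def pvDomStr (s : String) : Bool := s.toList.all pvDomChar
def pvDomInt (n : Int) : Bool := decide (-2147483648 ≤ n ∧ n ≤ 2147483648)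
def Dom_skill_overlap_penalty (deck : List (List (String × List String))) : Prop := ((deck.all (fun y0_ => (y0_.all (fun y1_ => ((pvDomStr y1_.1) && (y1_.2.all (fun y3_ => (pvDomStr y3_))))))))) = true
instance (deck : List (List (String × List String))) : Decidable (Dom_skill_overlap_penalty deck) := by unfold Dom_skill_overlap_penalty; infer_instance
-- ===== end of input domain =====

-- B replaces A's incremental seen-set membership loop by sorting the flattened skill list
-- and counting equal adjacent pairs in the sorted order; objective: alternative (sort-then-scan).

-- ===== PORT A =====
def skill_overlap_penalty (deck : List (List (String × List String))) : Int :=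
  (deck.foldl
    (fun (st : PySem.Set String × Int) card =>
      (PySem.Dict.getD (PySem.Dict.mk card) "skills" []).foldl
        (fun (st2 : PySem.Set String × Int) skill =>
          (PySem.Set.add st2.1 skill,
           if PySem.Set.contains st2.1 skill then st2.2 + 20 else st2.2))
        st)
    (PySem.Set.empty, 0)).2

-- ===== PORT B =====
def skill_overlap_penalty_alt (deck : List (List (String × List String))) : Int :=
  let allSkills :=
    PySem.List.sorted
      (deck.flatMap (fun card => PySem.Dict.getD (PySem.Dict.mk card) "skills" []))
      (fun s => s) false
  -- all_skills[1:] on a list is List.drop 1 (exact: the index 1 is nonnegative)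
  20 * (((allSkills.zip (allSkills.drop 1)).countP (fun p => p.1 == p.2) : Int))

-- ===== PRECONDITION & SPEC =====
def Spec_skill_overlap_penalty (deck : List (List (String × List String))) (out : Int) : Prop := out = skill_overlap_penalty_alt deck
instance (deck : List (List (String × List String))) (out : Int) : Decidable (Spec_skill_overlap_penalty deck out) := by unfold Spec_skill_overlap_penalty; infer_instance

-- ===== CLAIM (what is proved, stated in full; the proofs are below) =====
def Claim_equal_skill_overlap_penalty : Prop := ∀ (deck : List (List (String × List String))), Dom_skill_overlap_penalty deck → Spec_skill_overlap_penalty deck (skill_overlap_penalty deck)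

-- ===== LEMMAS AND PROOFS =====

def pvStep (st : PySem.Set String × Int) (skill : String) : PySem.Set String × Int :=
  (PySem.Set.add st.1 skill, if PySem.Set.contains st.1 skill then st.2 + 20 else st.2)

lemma foldl_pvStep_snd (l : List String) (s : PySem.Set String) (p : Int) :
    (l.foldl pvStep (s, p)).2
      = p + 20 * ((l.length : Int) + (s.length : Int) - ((PySem.Set.update s l).length : Int)) := by
  induction l generalizing s p with
  | nil => simp [PySem.Set.update]
  | cons x xs ih =>
    simp only [List.foldl_cons]
    have hupd : PySem.Set.update s (x :: xs) = PySem.Set.update (PySem.Set.add s x) xs := rfl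
    by_cases h : PySem.Set.contains s x
    · have hmem : x ∈ s := (PySem.Set.contains_iff s x).mp h
      have hadd : PySem.Set.add s x = s := PySem.Set.add_of_mem hmem
      rw [show pvStep (s, p) x = (PySem.Set.add s x, p + 20) by simp [pvStep, hmem]]
      rw [ih, hupd, hadd]
      push_cast [List.length_cons]
      ring
    · have hmem : x ∉ s := fun hx => h ((PySem.Set.contains_iff s x).mpr hx)
      rw [show pvStep (s, p) x = (PySem.Set.add s x, p) by simp [pvStep, hmem]]
      rw [ih, hupd]
      have hlen : ((PySem.Set.add s x).length : Int) = (s.length : Int) + 1 := by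
        rw [PySem.Set.add_of_not_mem hmem]; simp
      rw [hlen]
      push_cast [List.length_cons]
      ring

lemma foldl_double_eq_flat (deck : List (List (String × List String)))
    (st : PySem.Set String × Int) :
    deck.foldl (fun st card => (PySem.Dict.getD (PySem.Dict.mk card) "skills" []).foldl pvStep st) st
      = (deck.flatMap (fun card => PySem.Dict.getD (PySem.Dict.mk card) "skills" [])).foldl pvStep st := by
  induction deck generalizing st with
  | nil => rfl
  | cons c cs ih => simp [List.flatMap_cons, List.foldl_append, ih]

lemma ofList_length_eq_toFinset_card (l : List String) :
    (PySem.Set.ofList l).length = l.toFinset.card := by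
  have hnd : (PySem.Set.ofList l).Nodup := PySem.Set.nodup_ofList l
  have hfin : (PySem.Set.ofList l).toFinset = l.toFinset := by
    apply Finset.ext; intro a
    simp [List.mem_toFinset, PySem.Set.mem_ofList]
  rw [← List.toFinset_card_of_nodup hnd, hfin]

-- on a ≤-sorted list, equal adjacent pairs count the repeats: count + #distinct = length
lemma countAdj_sorted (l : List String) (h : l.Pairwise (· ≤ ·)) :
    (l.zip (l.drop 1)).countP (fun p => p.1 == p.2) + l.toFinset.card = l.length := by
  induction l with
  | nil => simp
  | cons x xs ih =>
    cases xs with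
    | nil => simp
    | cons y t =>
      have hx : x ≤ y ∧ ∀ z ∈ t, x ≤ z := by
        have := (List.pairwise_cons.mp h).1
        exact ⟨this y (by simp), fun z hz => this z (by simp [hz])⟩
      have htail : (y :: t).Pairwise (· ≤ ·) := (List.pairwise_cons.mp h).2
      have ihy := ih htail
      by_cases hxy : x = y
      · subst hxy
        simp only [List.drop_succ_cons, List.drop_zero, List.zip_cons_cons, List.countP_cons,
          List.toFinset_cons, Finset.insert_idem, List.length_cons, BEq.rfl, if_pos]
        simp only [List.drop_succ_cons, List.drop_zero, List.toFinset_cons,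
          List.length_cons] at ihy
        omega
      · have hmem : x ∉ y :: t := by
          intro hm
          rcases List.mem_cons.mp hm with h1 | h2
          · exact hxy h1
          · have hyx : y ≤ x := (List.pairwise_cons.mp htail).1 x h2
            exact hxy (le_antisymm hx.1 hyx)
        have hnm : x ∉ insert y t.toFinset := by
          intro h'
          exact hmem (List.mem_toFinset.mp (by simpa [List.toFinset_cons] using h'))
        have hcard : (insert x (insert y t.toFinset)).card = (insert y t.toFinset).card + 1 :=
          Finset.card_insert_of_notMem hnm
        have hb : (x == y) = false := by simp [hxy]
        simp only [List.drop_succ_cons, List.drop_zero, List.zip_cons_cons, List.countP_cons,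
          List.toFinset_cons, List.length_cons, hb, hcard]
        simp only [List.drop_succ_cons, List.drop_zero, List.toFinset_cons,
          List.length_cons] at ihy
        simp only [Bool.false_eq_true, if_false]
        omega

-- ===== VERDICT (by name: the statement is the Claim_ definition above) =====
theorem skill_overlap_penalty_spec : Claim_equal_skill_overlap_penalty := by
  intro deck _
  unfold Spec_skill_overlap_penalty skill_overlap_penalty skill_overlap_penalty_alt
  have h1 : (fun (st2 : PySem.Set String × Int) skill =>
      (PySem.Set.add st2.1 skill,
       if PySem.Set.contains st2.1 skill then st2.2 + 20 else st2.2)) = pvStep := rfl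
  rw [h1, foldl_double_eq_flat, foldl_pvStep_snd]
  set flat := deck.flatMap (fun card => PySem.Dict.getD (PySem.Dict.mk card) "skills" []) with hflat
  set srt := PySem.List.sorted flat (fun s => s) false with hsrt
  have hperm : srt.Perm flat := PySem.List.sorted_perm flat (fun s => s) false
  have hpw : srt.Pairwise (· ≤ ·) := by
    simpa using PySem.List.sorted_pairwise flat (fun s => s)
  have hadj := countAdj_sorted srt hpw
  have hlen : srt.length = flat.length := hperm.length_eq
  have hfin : srt.toFinset = flat.toFinset := List.toFinset_eq_of_perm srt flat hperm
  have hupd : PySem.Set.update PySem.Set.empty flat = PySem.Set.ofList flat := rfl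
  rw [hupd, ofList_length_eq_toFinset_card]
  rw [hlen, hfin] at hadj
  show 0 + 20 * ((flat.length : Int) + ((PySem.Set.empty : PySem.Set String).length : Int)
        - (flat.toFinset.card : Int))
      = 20 * (((srt.zip (srt.drop 1)).countP (fun p => p.1 == p.2) : Int))
  have hemp : ((PySem.Set.empty : PySem.Set String).length : Int) = 0 := rfl
  rw [hemp]
  omega
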